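-- pv_equiv track=rewrite | github.com/scozzano/study-planner-with-AI | backend/src/recommender/spm_train.py | longest_prefix_match_len
-- ===== SOURCE A (Python) =====
-- from typing import Dict, Any, List, Tuple, Iterable, Optional, Set
--
-- def pattern_occurs_and_end_index(pattern: List[str], seq_terms: List[List[str]]) -> Optional[int]:
--     if not pattern:
--         return -1
--     start = 0
--     for p in pattern:
--         found = False
--         for term_idx in range(start, len(seq_terms)):
--             if p in seq_terms[term_idx]:
--                 start = term_idx + 1
--                 found = True
--                 break
--         if not found:
--             return None
--     return start - 1
--
-- def longest_prefix_match_len(pattern: List[str], seq_terms: List[List[str]]) -> int: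
--     if not pattern: return 0
--     m = 0
--     for i in range(1, len(pattern)+1):
--         if pattern_occurs_and_end_index(pattern[:i], seq_terms) is not None:
--             m = i
--         else:
--             break
--     return m
-- ===== SOURCE B (Python) =====
-- def longest_prefix_match_len(pattern, seq_terms):
--     # Single greedy left-to-right pass: k counts how many pattern terms have
--     # been matched so far; a term matches pattern[k] at the first opportunity.
--     k = 0
--     for term in seq_terms:
--         if k < len(pattern) and pattern[k] in term:
--             k += 1
--     return k
-- ===== Notes on version B (the rewrite author's own statement) =====
-- stated objective: simpler
-- what changed: Replaced the per-prefix restart (for each prefix length, re-run the greedy subsequence scan from position 0) by one single greedy left-to-right pass over seq_terms that counts matched pattern terms incrementally.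
import Mathlib
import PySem

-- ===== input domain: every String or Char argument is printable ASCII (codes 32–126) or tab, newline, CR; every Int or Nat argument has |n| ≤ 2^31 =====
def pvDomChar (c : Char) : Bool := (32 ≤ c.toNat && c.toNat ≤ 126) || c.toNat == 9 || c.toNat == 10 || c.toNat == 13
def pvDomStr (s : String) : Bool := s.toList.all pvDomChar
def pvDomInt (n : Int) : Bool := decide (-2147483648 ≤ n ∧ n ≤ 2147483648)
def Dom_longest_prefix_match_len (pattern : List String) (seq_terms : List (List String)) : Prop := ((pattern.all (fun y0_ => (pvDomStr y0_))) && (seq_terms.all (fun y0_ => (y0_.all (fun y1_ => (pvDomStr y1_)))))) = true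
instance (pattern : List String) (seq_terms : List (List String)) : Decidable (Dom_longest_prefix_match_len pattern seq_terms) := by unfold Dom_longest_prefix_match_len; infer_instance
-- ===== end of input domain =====

-- B replaces A's per-prefix greedy restarts with one incremental greedy pass over seq_terms (simpler).

-- ===== PORT A =====

-- inner 'for term_idx in range(start, len(seq_terms))' loop of pattern_occurs_and_end_index
def pvFindFrom (p : String) (seq : List (List String)) (start : Nat) : Option Nat :=
  if h : start < seq.length then
    if p ∈ seq[start] then some start else pvFindFrom p seq (start + 1)
  else none
termination_by seq.length - start

-- 'for p in pattern' loop of pattern_occurs_and_end_index, carrying 'start'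
def pvOccLoop (q : List String) (seq : List (List String)) (start : Nat) : Option Int :=
  match q with
  | [] => some ((start : Int) - 1)
  | p :: ps =>
      match pvFindFrom p seq start with
      | none => none
      | some idx => pvOccLoop ps seq (idx + 1)

def pattern_occurs_and_end_index (pattern : List String) (seq : List (List String)) : Option Int :=
  if pattern = [] then some (-1) else pvOccLoop pattern seq 0

-- outer 'for i in range(1, len(pattern)+1)' loop with break, carrying m
def pvOuterLoop (pattern : List String) (seq : List (List String)) (i m : Nat) : Nat :=
  if i ≤ pattern.length then
    if (pattern_occurs_and_end_index (pattern.take i) seq).isSome then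
      pvOuterLoop pattern seq (i + 1) i
    else m
  else m
termination_by pattern.length + 1 - i

def longest_prefix_match_len (pattern : List String) (seq_terms : List (List String)) : Int :=
  if pattern = [] then 0 else (pvOuterLoop pattern seq_terms 1 0 : Int)

-- ===== PORT B =====
def longest_prefix_match_len_alt (pattern : List String) (seq_terms : List (List String)) : Int :=
  (seq_terms.foldl
    (fun k term =>
      match pattern[k]? with
      | some p => if p ∈ term then k + 1 else k
      | none => k)
    (0 : Nat) : Nat)

-- ===== PRECONDITION & SPEC =====
def Spec_longest_prefix_match_len (pattern : List String) (seq_terms : List (List String)) (out : Int) : Prop := out = longest_prefix_match_len_alt pattern seq_terms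
instance (pattern : List String) (seq_terms : List (List String)) (out : Int) : Decidable (Spec_longest_prefix_match_len pattern seq_terms out) := by unfold Spec_longest_prefix_match_len; infer_instance

-- ===== CLAIM (what is proved, stated in full; the proofs are below) =====
def Claim_equal_longest_prefix_match_len : Prop := ∀ (pattern : List String) (seq_terms : List (List String)), Dom_longest_prefix_match_len pattern seq_terms → Spec_longest_prefix_match_len pattern seq_terms (longest_prefix_match_len pattern seq_terms)

-- ===== LEMMAS AND PROOFS =====

-- structural greedy match count (proof-side reference function)
def pvGr (q : List String) (seq : List (List String)) : Nat :=
  match q, seq with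
  | [], _ => 0
  | _ :: _, [] => 0
  | p :: ps, t :: ts => if p ∈ t then 1 + pvGr ps ts else pvGr (p :: ps) ts

lemma pvGr_nil_seq (q : List String) : pvGr q [] = 0 := by
  cases q <;> rfl

lemma pvGr_le (q : List String) (seq : List (List String)) : pvGr q seq ≤ q.length := by
  induction seq generalizing q with
  | nil => simp [pvGr_nil_seq]
  | cons t ts ih =>
    cases q with
    | nil => simp [pvGr]
    | cons p ps =>
      simp only [pvGr]
      split
      · have := ih ps; simp; omega
      · have := ih (p :: ps); simpa using this

lemma pvGr_take (q : List String) (seq : List (List String)) (i : Nat) :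
    pvGr (q.take i) seq = min i (pvGr q seq) := by
  induction seq generalizing q i with
  | nil => simp [pvGr_nil_seq]
  | cons t ts ih =>
    cases q with
    | nil => simp [pvGr]
    | cons p ps =>
      cases i with
      | zero => simp [pvGr]
      | succ j =>
        simp only [List.take_succ_cons, pvGr]
        split
        · rw [ih ps j]; omega
        · exact ih (p :: ps) (j + 1)

-- B's fold, starting at match count k, adds the greedy count of the remaining pattern
lemma pvFold_eq (pattern : List String) (seq : List (List String)) :
    ∀ k : Nat,
      seq.foldl
        (fun k term =>
          match pattern[k]? with
          | some p => if p ∈ term then k + 1 else k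
          | none => k)
        k = k + pvGr (pattern.drop k) seq := by
  induction seq with
  | nil => intro k; simp [pvGr_nil_seq]
  | cons t ts ih =>
    intro k
    by_cases hk : k < pattern.length
    · have hdrop : pattern.drop k = pattern[k] :: pattern.drop (k + 1) :=
        (List.drop_eq_getElem_cons hk)
      rw [List.foldl_cons]
      by_cases hmem : pattern[k] ∈ t
      · simp only [List.getElem?_eq_getElem hk, hmem, if_pos]
        rw [ih (k + 1), hdrop]
        simp [pvGr, hmem]; omega
      · simp only [List.getElem?_eq_getElem hk, hmem, if_neg, not_false_iff]
        rw [ih k, hdrop]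
        simp [pvGr, hmem]
    · have h1 : pattern[k]? = none := by
        rw [List.getElem?_eq_none]; omega
      have h2 : pattern.drop k = [] := by
        rw [List.drop_eq_nil_iff]; omega
      rw [List.foldl_cons]
      simp only [h1]
      rw [ih k, h2]
      simp [pvGr]

-- A's pvOccLoop succeeds from start s iff greedy matches the whole of q in seq.drop s
lemma pvOccLoop_isSome (q : List String) (seq : List (List String)) :
    ∀ s : Nat, (pvOccLoop q seq s).isSome = true ↔ pvGr q (seq.drop s) = q.length := by
  induction q with
  | nil => intro s; simp [pvOccLoop, pvGr]
  | cons p ps ih =>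
    suffices H : ∀ n s, seq.length - s ≤ n →
        ((pvOccLoop (p :: ps) seq s).isSome = true ↔ pvGr (p :: ps) (seq.drop s) = (p :: ps).length) by
      intro s; exact H (seq.length - s) s le_rfl
    intro n
    induction n with
    | zero =>
      intro s hs
      have hlen : seq.length ≤ s := by omega
      have hdrop : seq.drop s = [] := by rw [List.drop_eq_nil_iff]; omega
      rw [pvOccLoop, pvFindFrom]
      rw [dif_neg (by omega)]
      simp [hdrop, pvGr]
    | succ n ihn =>
      intro s hs
      by_cases hlt : s < seq.length
      · have hdrop : seq.drop s = seq[s] :: seq.drop (s + 1) :=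
          (List.drop_eq_getElem_cons hlt)
        by_cases hmem : p ∈ seq[s]
        · have hfind : pvFindFrom p seq s = some s := by
            rw [pvFindFrom, dif_pos hlt, if_pos hmem]
          rw [pvOccLoop, hfind, hdrop]
          simp only [pvGr, if_pos hmem]
          rw [ih (s + 1)]
          simp only [List.length_cons]
          omega
        · have hfind : pvFindFrom p seq s = pvFindFrom p seq (s + 1) := by
            rw [pvFindFrom, dif_pos hlt, if_neg hmem]
          have step : pvOccLoop (p :: ps) seq s = pvOccLoop (p :: ps) seq (s + 1) := by
            rw [pvOccLoop, hfind, pvOccLoop]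
          rw [step, hdrop]
          simp only [pvGr, if_neg hmem]
          exact ihn (s + 1) (by omega)
      · have hdrop : seq.drop s = [] := by rw [List.drop_eq_nil_iff]; omega
        rw [pvOccLoop, pvFindFrom, dif_neg (by omega)]
        simp [hdrop, pvGr]

-- A's outer loop computes the greedy count
lemma pvOuterLoop_eq (pattern : List String) (seq : List (List String)) :
    ∀ i : Nat, 1 ≤ i → i ≤ pattern.length + 1 → i ≤ pvGr pattern seq + 1 →
      pvOuterLoop pattern seq i (i - 1) = pvGr pattern seq := by
  have hgle := pvGr_le pattern seq
  suffices H : ∀ n i, pattern.length + 1 - i ≤ n → 1 ≤ i → i ≤ pattern.length + 1 →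
      i ≤ pvGr pattern seq + 1 → pvOuterLoop pattern seq i (i - 1) = pvGr pattern seq by
    intro i h1 h2 h3; exact H (pattern.length + 1 - i) i le_rfl h1 h2 h3
  intro n
  induction n with
  | zero =>
    intro i hn h1 h2 h3
    have hi : i = pattern.length + 1 := by omega
    rw [pvOuterLoop, if_neg (by omega)]
    omega
  | succ n ihn =>
    intro i hn h1 h2 h3
    by_cases hile : i ≤ pattern.length
    · have htake : (pattern.take i) ≠ [] := by
        have : (pattern.take i).length = i := by simp; omega
        intro hc; rw [hc] at this; simp at this; omega
      have hsome : (pattern_occurs_and_end_index (pattern.take i) seq).isSome = true ↔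
          min i (pvGr pattern seq) = i := by
        rw [pattern_occurs_and_end_index, if_neg htake]
        rw [pvOccLoop_isSome]
        simp only [List.drop_zero, pvGr_take]
        constructor
        · intro h; rw [h]; simp; omega
        · intro h; rw [h]; simp; omega
      by_cases hig : i ≤ pvGr pattern seq
      · have : (pattern_occurs_and_end_index (pattern.take i) seq).isSome = true := by
          rw [hsome]; omega
        rw [pvOuterLoop, if_pos hile, if_pos this]
        have := ihn (i + 1) (by omega) (by omega) (by omega) (by omega)
        simpa using this
      · have hfail : ¬ (pattern_occurs_and_end_index (pattern.take i) seq).isSome = true := by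
          rw [hsome]; omega
        rw [pvOuterLoop, if_pos hile, if_neg hfail]
        omega
    · rw [pvOuterLoop, if_neg hile]
      omega

-- ===== VERDICT (by name: the statement is the Claim_ definition above) =====
theorem longest_prefix_match_len_spec : Claim_equal_longest_prefix_match_len := by
  intro pattern seq_terms _
  unfold Spec_longest_prefix_match_len longest_prefix_match_len longest_prefix_match_len_alt
  rw [pvFold_eq pattern seq_terms 0]
  simp only [List.drop_zero, Nat.zero_add]
  by_cases hne : pattern = []
  · subst hne; simp [pvGr]
  · rw [if_neg hne]
    have h := pvOuterLoop_eq pattern seq_terms 1 le_rfl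
      (by have := List.length_pos_of_ne_nil hne; omega)
      (by omega)
    simp only [Nat.sub_self] at h
    rw [h]
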